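-- pv_equiv track=rewrite | github.com/kalkadam404/ai_cv_analyzer | backend/resumes/views.py | extract_resume_data
-- ===== SOURCE A (Python) =====
-- def extract_resume_data(text):
--     lines = text.splitlines()
--     skills = []
--     education = []
--     experience = []
--
--     current_section = None
--
--     for line in lines:
--         lower = line.lower()
--         if "skill" in lower:
--             current_section = "skills"
--             continue
--         elif "education" in lower:
--             current_section = "education"
--             continue
--         elif "experience" in lower or "employment" in lower:
--             current_section = "experience"
--             continue
--
--         if current_section == "skills":
--             skills.append(line.strip())
--         elif current_section == "education":
--             education.append(line.strip())
--         elif current_section == "experience":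
--             experience.append(line.strip())
--
--     return {
--         "skills": ', '.join(skills).strip(),
--         "education": '\n'.join(education).strip(),
--         "experience": '\n'.join(experience).strip(),
--     }
-- ===== SOURCE B (Python) =====
-- def _header(line):
--     low = line.lower()
--     if "skill" in low:
--         return "skills"
--     if "education" in low:
--         return "education"
--     if "experience" in low or "employment" in low:
--         return "experience"
--     return None
--
--
-- def extract_resume_data(text):
--     lines = text.splitlines()
--     n = len(lines)
--     buckets = {"skills": [], "education": [], "experience": []}
--     i = 0
--     while i < n:
--         name = _header(lines[i])
--         i += 1
--         if name is None:
--             continue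
--         start = i
--         while i < n and _header(lines[i]) is None:
--             i += 1
--         buckets[name].extend(line.strip() for line in lines[start:i])
--     return {
--         "skills": ', '.join(buckets["skills"]).strip(),
--         "education": '\n'.join(buckets["education"]).strip(),
--         "experience": '\n'.join(buckets["experience"]).strip(),
--     }
-- ===== Notes on version B (the rewrite author's own statement) =====
-- stated objective: alternative
-- what changed: B replaces A's per-line current-section state machine with header-boundary chunking: it scans to each header line, then consumes the whole span of non-header lines after it in one inner sweep and extends that header's bucket with the stripped span.
import Mathlib
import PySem

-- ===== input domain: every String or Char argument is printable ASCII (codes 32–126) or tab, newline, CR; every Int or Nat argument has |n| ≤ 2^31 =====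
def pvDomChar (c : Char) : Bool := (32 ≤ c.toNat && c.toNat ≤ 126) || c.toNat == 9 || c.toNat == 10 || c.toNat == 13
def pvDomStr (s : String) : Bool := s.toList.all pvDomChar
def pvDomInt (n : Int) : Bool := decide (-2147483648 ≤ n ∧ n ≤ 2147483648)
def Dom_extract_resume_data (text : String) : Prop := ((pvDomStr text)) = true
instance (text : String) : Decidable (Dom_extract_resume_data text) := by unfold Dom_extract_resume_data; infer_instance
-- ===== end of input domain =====

-- B re-groups the text by header boundaries (header + following span) instead of A's per-line
-- current-section state machine; same exact output, objective: alternative decomposition.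

-- ===== PORT A =====
-- the loop body of A's single for-loop; state = (skills, education, experience, current_section)
def stepA : List String × List String × List String × Option String → String →
    List String × List String × List String × Option String
  | (skills, education, experience, cur), line =>
  let lower := PySem.Str.lower line
  if PySem.Str.isIn "skill" lower then (skills, education, experience, some "skills")
  else if PySem.Str.isIn "education" lower then (skills, education, experience, some "education")
  else if PySem.Str.isIn "experience" lower || PySem.Str.isIn "employment" lower then
    (skills, education, experience, some "experience")
  else if cur == some "skills" then (skills ++ [PySem.Str.strip line], education, experience, cur)
  else if cur == some "education" then (skills, education ++ [PySem.Str.strip line], experience, cur)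
  else if cur == some "experience" then (skills, education, experience ++ [PySem.Str.strip line], cur)
  else (skills, education, experience, cur)

def extract_resume_data (text : String) : List (String × String) :=
  let lines := PySem.Str.splitlines text
  let st := lines.foldl stepA ([], [], [], none)
  [("skills", PySem.Str.strip (PySem.Str.join ", " st.1)),
   ("education", PySem.Str.strip (PySem.Str.join "\n" st.2.1)),
   ("experience", PySem.Str.strip (PySem.Str.join "\n" st.2.2.1))]

-- ===== PORT B =====
def headerOf (line : String) : Option String :=
  let low := PySem.Str.lower line
  if PySem.Str.isIn "skill" low then some "skills"
  else if PySem.Str.isIn "education" low then some "education"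
  else if PySem.Str.isIn "experience" low || PySem.Str.isIn "employment" low then some "experience"
  else none

-- buckets[name].extend(body) over the three fixed keys of Source B's buckets dict; collectB recurses on
-- the remaining lines, so the current span's body goes in FRONT of the later chunks (= loop order)
def addBucket (name : String) (body : List String)
    (r : List String × List String × List String) : List String × List String × List String :=
  if name == "skills" then (body ++ r.1, r.2.1, r.2.2)
  else if name == "education" then (r.1, body ++ r.2.1, r.2.2)
  else (r.1, r.2.1, body ++ r.2.2)

-- Source B's outer while loop: consume one line; if header, take the span of non-header lines after it
def collectB : List String → List String × List String × List String
  | [] => ([], [], [])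
  | l :: rest =>
    match headerOf l with
    | none => collectB rest
    | some name =>
      addBucket name ((rest.takeWhile (fun x => (headerOf x).isNone)).map PySem.Str.strip)
        (collectB (rest.dropWhile (fun x => (headerOf x).isNone)))
termination_by lines => lines.length
decreasing_by
· simp
· exact Nat.lt_succ_of_le (List.length_dropWhile_le _ _)

def extract_resume_data_alt (text : String) : List (String × String) :=
  let b := collectB (PySem.Str.splitlines text)
  [("skills", PySem.Str.strip (PySem.Str.join ", " b.1)),
   ("education", PySem.Str.strip (PySem.Str.join "\n" b.2.1)),
   ("experience", PySem.Str.strip (PySem.Str.join "\n" b.2.2))]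

-- ===== PRECONDITION & SPEC =====
def Spec_extract_resume_data (text : String) (out : List (String × String)) : Prop := out = extract_resume_data_alt text
instance (text : String) (out : List (String × String)) : Decidable (Spec_extract_resume_data text out) := by unfold Spec_extract_resume_data; infer_instance

-- ===== CLAIM (what is proved, stated in full; the proofs are below) =====
def Claim_equal_extract_resume_data : Prop := ∀ (text : String), Dom_extract_resume_data text → Spec_extract_resume_data text (extract_resume_data text)

-- ===== LEMMAS AND PROOFS =====

-- proof-only helpers
def proj (st : List String × List String × List String × Option String) :
    List String × List String × List String := (st.1, st.2.1, st.2.2.1)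

def app3 (a b : List String × List String × List String) :
    List String × List String × List String := (a.1 ++ b.1, a.2.1 ++ b.2.1, a.2.2 ++ b.2.2)

-- what B contributes from the lines A processes with current_section = name
def gB (name : String) (lines : List String) : List String × List String × List String :=
  addBucket name ((lines.takeWhile (fun x => (headerOf x).isNone)).map PySem.Str.strip)
    (collectB (lines.dropWhile (fun x => (headerOf x).isNone)))

theorem addBucket_nil (name : String) (r : List String × List String × List String) :
    addBucket name [] r = r := by
  unfold addBucket; split_ifs <;> simp

theorem stepA_eq (a b c : List String) (cur : Option String) (line : String) :
    stepA (a, b, c, cur) line =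
      match headerOf line with
      | some n => (a, b, c, some n)
      | none =>
        if cur == some "skills" then (a ++ [PySem.Str.strip line], b, c, cur)
        else if cur == some "education" then (a, b ++ [PySem.Str.strip line], c, cur)
        else if cur == some "experience" then (a, b, c ++ [PySem.Str.strip line], cur)
        else (a, b, c, cur) := by
  by_cases h1 : PySem.Str.isIn "skill" (PySem.Str.lower line) = true
  · simp only [stepA, headerOf, if_pos h1]
  · by_cases h2 : PySem.Str.isIn "education" (PySem.Str.lower line) = true
    · simp only [stepA, headerOf, if_neg h1, if_pos h2]
    · by_cases h3 : (PySem.Str.isIn "experience" (PySem.Str.lower line) ||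
          PySem.Str.isIn "employment" (PySem.Str.lower line)) = true
      · simp only [stepA, headerOf, if_neg h1, if_neg h2, if_pos h3]
      · simp only [stepA, headerOf, if_neg h1, if_neg h2, if_neg h3]

theorem headerOf_cases (l : String) (n : String) (h : headerOf l = some n) :
    n = "skills" ∨ n = "education" ∨ n = "experience" := by
  by_cases h1 : PySem.Str.isIn "skill" (PySem.Str.lower l) = true
  · simp only [headerOf, if_pos h1, Option.some.injEq] at h; exact Or.inl h.symm
  · by_cases h2 : PySem.Str.isIn "education" (PySem.Str.lower l) = true
    · simp only [headerOf, if_neg h1, if_pos h2, Option.some.injEq] at h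
      exact Or.inr (Or.inl h.symm)
    · by_cases h3 : (PySem.Str.isIn "experience" (PySem.Str.lower l) ||
          PySem.Str.isIn "employment" (PySem.Str.lower l)) = true
      · simp only [headerOf, if_neg h1, if_neg h2, if_pos h3, Option.some.injEq] at h
        exact Or.inr (Or.inr h.symm)
      · simp only [headerOf, if_neg h1, if_neg h2, if_neg h3, reduceCtorEq] at h

theorem collectB_cons_some (l : String) (rest : List String) (n : String)
    (h : headerOf l = some n) : collectB (l :: rest) = gB n rest := by
  rw [collectB, gB]; simp only [h]

theorem collectB_cons_none (l : String) (rest : List String)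
    (h : headerOf l = none) : collectB (l :: rest) = collectB rest := by
  rw [collectB]; simp only [h]

theorem gB_cons_some (name : String) (l : String) (rest : List String) (n : String)
    (h : headerOf l = some n) : gB name (l :: rest) = gB n rest := by
  rw [gB, List.takeWhile_cons, List.dropWhile_cons]
  simp only [h, Option.isNone_some, Bool.false_eq_true, if_false, List.map_nil, addBucket_nil]
  exact collectB_cons_some l rest n h

theorem gB_cons_none (name : String) (l : String) (rest : List String)
    (h : headerOf l = none) :
    gB name (l :: rest) =
      addBucket name (PySem.Str.strip l ::
          (rest.takeWhile (fun x => (headerOf x).isNone)).map PySem.Str.strip)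
        (collectB (rest.dropWhile (fun x => (headerOf x).isNone))) := by
  rw [gB, List.takeWhile_cons, List.dropWhile_cons]
  simp [h]

theorem L_some : ∀ (lines : List String) (name : String) (a b c : List String),
    (name = "skills" ∨ name = "education" ∨ name = "experience") →
    proj (lines.foldl stepA (a, b, c, some name)) = app3 (a, b, c) (gB name lines) := by
  intro lines
  induction lines with
  | nil =>
    intro name a b c _
    simp [proj, gB, app3, collectB, addBucket_nil]
  | cons l rest ih =>
    intro name a b c hname
    rw [List.foldl_cons, stepA_eq]
    cases hl : headerOf l with
    | some n =>
      rw [gB_cons_some name l rest n hl]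
      exact ih n a b c (headerOf_cases l n hl)
    | none =>
      rw [gB_cons_none name l rest hl]
      rcases hname with h | h | h <;> subst h <;>
        simp only [Option.some.injEq, beq_iff_eq, String.reduceEq, if_true, if_false]
      · rw [ih "skills" (a ++ [PySem.Str.strip l]) b c (Or.inl rfl), gB]
        simp [app3, addBucket]
      · rw [ih "education" a (b ++ [PySem.Str.strip l]) c (Or.inr (Or.inl rfl)), gB]
        simp [app3, addBucket]
      · rw [ih "experience" a b (c ++ [PySem.Str.strip l]) (Or.inr (Or.inr rfl)), gB]
        simp [app3, addBucket]

theorem L_none : ∀ (lines : List String) (a b c : List String),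
    proj (lines.foldl stepA (a, b, c, none)) = app3 (a, b, c) (collectB lines) := by
  intro lines
  induction lines with
  | nil => intro a b c; simp [proj, app3, collectB]
  | cons l rest ih =>
    intro a b c
    rw [List.foldl_cons, stepA_eq]
    cases hl : headerOf l with
    | some n =>
      rw [collectB_cons_some l rest n hl]
      exact L_some rest n a b c (headerOf_cases l n hl)
    | none =>
      rw [collectB_cons_none l rest hl]
      simpa using ih a b c

-- ===== VERDICT (by name: the statement is the Claim_ definition above) =====
theorem extract_resume_data_spec : Claim_equal_extract_resume_data := by
  intro text _
  unfold Spec_extract_resume_data extract_resume_data extract_resume_data_alt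
  have h := L_none (PySem.Str.splitlines text) [] [] []
  simp only [app3, List.nil_append] at h
  have h1 := congrArg Prod.fst h
  have h2 := congrArg (fun p => p.2.1) h
  have h3 := congrArg (fun p => p.2.2) h
  simp only [proj] at h1 h2 h3
  simp only [h1, h2, h3]
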